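-- pv_equiv track=rewrite | github.com/JBRS307/ASD | death/kol2/kol2_ve.py | beautree
-- ===== SOURCE A (Python) =====
-- from collections import deque
--
-- def BFS(G, v):
--     visited = [False]*len(G)
--     q = deque()
--     visited[v] = True
--     q.append(v)
--
--     while q:
--         s = q.popleft()
--         for neigh in G[s]:
--             if not visited[neigh]:
--                 visited[neigh] = True
--                 q.append(neigh)
--
--     return False not in visited
--
-- def list_to_edge(G, n):
--     E = []
--     for s in range(n):
--         for neigh in G[s]:
--             if s < neigh[0]:
--                 E.append((s, neigh[0], neigh[1]))
--     return E
--
-- def edge_to_list(E, n):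
--     G = [[] for _ in range(n)]
--
--     for edge in E:
--         G[edge[0]].append(edge[1])
--         G[edge[1]].append(edge[0])
--
--     return G
--
-- def beautree(G):
--     n = len(G)
--     E = list_to_edge(G, n)
--     m = len(E)
--
--     E.sort(key=lambda x: x[2])
--
--     T = E[:n-1]
--     mass = 0
--     for edge in T:
--         mass += edge[2]
--
--     T = edge_to_list(T, n)
--
--     first = 0
--     last = n-1
--     if BFS(T, 0):
--         min_mass = mass
--     else:
--         min_mass = float('inf')
--
--     while last < m:
--         rem = E[first]
--         add = E[last]
--
--         T[rem[0]].remove(rem[1])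
--         T[rem[1]].remove(rem[0])
--
--         T[add[0]].append(add[1])
--         T[add[1]].append(add[0])
--
--         mass -= rem[2]
--         mass += add[2]
--
--         if BFS(T, 0):
--             min_mass = mass if mass < min_mass else min_mass
--
--         first += 1
--         last += 1
--
--     return min_mass if min_mass != float('inf') else None
-- ===== SOURCE B (Python) =====
-- def _connected(E, n):
--     # Bellman-Ford-style reachability from vertex 0 over the edge list:
--     # n sweeps over the edges, marking both endpoints whenever one is marked.
--     reach = [False] * n
--     if n > 0:
--         reach[0] = True
--     for _ in range(n):
--         for a, b, _w in E:
--             if reach[a] or reach[b]: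
--                 reach[a] = True
--                 reach[b] = True
--     return all(reach)
--
-- def beautree(G):
--     n = len(G)
--     E = sorted(((s, v, w) for s in range(n) for (v, w) in G[s] if s < v),
--                key=lambda e: e[2])
--     m = len(E)
--     best = None
--     for k in range(1 + max(0, m - n + 1)):
--         window = E[k:k + n - 1]
--         if _connected(window, n):
--             mass = sum(w for _, _, w in window)
--             if best is None or mass < best:
--                 best = mass
--     return best
-- ===== Notes on version B (the rewrite author's own statement) =====
-- stated objective: alternative
-- what changed: Replaces A's incrementally mutated adjacency lists + BFS-from-0 with a deque and a sliding sum by, per window of n-1 sorted edges, a Bellman-Ford-style edge-list sweep reachability check (n marking passes over the window's edges, no adjacency structure, no queue) and a direct re-summation of the window's (integer) weights.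
import Mathlib
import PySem

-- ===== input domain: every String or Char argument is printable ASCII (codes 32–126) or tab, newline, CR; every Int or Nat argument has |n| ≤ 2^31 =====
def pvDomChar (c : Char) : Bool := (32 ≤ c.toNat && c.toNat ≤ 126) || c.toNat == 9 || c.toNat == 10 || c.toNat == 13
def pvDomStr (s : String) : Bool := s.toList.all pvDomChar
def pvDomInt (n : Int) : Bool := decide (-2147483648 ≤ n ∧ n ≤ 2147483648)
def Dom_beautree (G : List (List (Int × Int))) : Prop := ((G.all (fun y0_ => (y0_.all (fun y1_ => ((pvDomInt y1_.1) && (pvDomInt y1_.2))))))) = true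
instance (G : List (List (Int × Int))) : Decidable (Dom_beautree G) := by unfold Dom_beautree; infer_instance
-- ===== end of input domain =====

-- B replaces A's incrementally-mutated adjacency lists + BFS-from-0 (deque) and sliding sum by a
-- per-window edge-list sweep reachability check (Bellman-Ford style) and a direct window re-sum;
-- objective: alternative (equal value on every input where A returns; A raises IndexError on []).

-- ===== PORT A =====
-- helper lemmas needed by the port's termination proof stay above the port (cited by decreasing_by)
theorem pvCountFalseSet : ∀ (xs : List Bool) (j : Nat), j < xs.length → xs.getD j true = false →
    (xs.set j true).count false + 1 = xs.count false := by
  intro xs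
  induction xs with
  | nil => intro j h; simp at h
  | cons a t ih =>
    intro j hj hx
    cases j with
    | zero => simp at hx; subst hx; simp
    | succ k =>
      simp only [List.set_cons_succ, List.count_cons]
      have := ih k (by simpa using hj) (by simpa using hx)
      omega

theorem pvIdxLt {n : Nat} {x : Int} {k : Nat} (hk : PySem.List.pyIdx? n x = some k) : k < n := by
  unfold PySem.List.pyIdx? at hk
  split_ifs at hk <;> simp_all <;> omega

def pvBfsStep (vq : List Bool × List Int) (neigh : Int) : List Bool × List Int :=
  if PySem.List.pyGetD vq.1 neigh true = false then
    (PySem.List.pySetD vq.1 neigh true, vq.2 ++ [neigh])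
  else vq

theorem pvBfsStep_measure (vq : List Bool × List Int) (x : Int) :
    (pvBfsStep vq x).1.count false + (pvBfsStep vq x).2.length ≤ vq.1.count false + vq.2.length := by
  unfold pvBfsStep
  split
  · next hguard =>
    rcases hk : PySem.List.pyIdx? vq.1.length x with _ | k
    · simp [PySem.List.pyGetD, PySem.List.pyGet?, hk] at hguard
    · have hklt : k < vq.1.length := pvIdxLt hk
      have hval : vq.1.getD k true = false := by
        simp [PySem.List.pyGetD, PySem.List.pyGet?, hk, List.getD_eq_getElem?_getD] at hguard ⊢
        simpa [List.getElem?_eq_getElem hklt] using hguard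
      have hset : PySem.List.pySetD vq.1 x true = vq.1.set k true := by
        simp [PySem.List.pySetD, PySem.List.pySet?, hk]
      have := pvCountFalseSet vq.1 k hklt hval
      simp only [hset, List.length_append, List.length_cons, List.length_nil]
      omega
  · omega

theorem pvBfsFold_measure (L : List Int) (vq : List Bool × List Int) :
    (L.foldl pvBfsStep vq).1.count false + (L.foldl pvBfsStep vq).2.length ≤
      vq.1.count false + vq.2.length := by
  induction L generalizing vq with
  | nil => simp
  | cons x t ih =>
    simp only [List.foldl_cons]
    exact le_trans (ih (pvBfsStep vq x)) (pvBfsStep_measure vq x)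

def pvBfsLoop (T : List (List Int)) (visited : List Bool) (q : List Int) : List Bool :=
  match q with
  | [] => visited
  | s :: qs =>
    let vq := (PySem.List.pyGetD T s []).foldl pvBfsStep (visited, qs)
    pvBfsLoop T vq.1 vq.2
termination_by visited.count false + q.length
decreasing_by
  have h := pvBfsFold_measure (PySem.List.pyGetD T s []) (visited, qs)
  dsimp only at h
  simp only [List.length_cons]
  omega

-- BFS(G, v) of A (deque modelled as a list popped at the head, appended at the tail)
def BFSa (T : List (List Int)) (v : Int) : Bool :=
  let visited := List.replicate T.length false
  let visited := PySem.List.pySetD visited v true   -- visited[v] = True (IndexError outside Pre_)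
  !((pvBfsLoop T visited [v]).contains false)       -- False not in visited

def list_to_edge (G : List (List (Int × Int))) (n : Int) : List (Int × Int × Int) :=
  (PySem.List.pyRange 0 n 1).foldl (fun E s =>
    (PySem.List.pyGetD G s []).foldl
      (fun E p => if s < p.1 then E ++ [(s, p.1, p.2)] else E) E) []

def pvAppendAt (T : List (List Int)) (i b : Int) : List (List Int) :=
  PySem.List.pySetD T i (PySem.List.pyGetD T i [] ++ [b])   -- T[i].append(b)

def pvRemoveAt (T : List (List Int)) (i b : Int) : List (List Int) :=
  match PySem.List.remove? (PySem.List.pyGetD T i []) b with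
  | some l => PySem.List.pySetD T i l                        -- T[i].remove(b)
  | none => T                                                -- ValueError: unreachable under Pre_

def edge_to_list (E : List (Int × Int × Int)) (n : Int) : List (List Int) :=
  E.foldl (fun T e => pvAppendAt (pvAppendAt T e.1 e.2.1) e.2.1 e.1)
    (List.replicate n.toNat [])

-- the while-loop of beautree; min_mass : Option Int with none = float('inf')
def pvALoop (E : List (Int × Int × Int)) (m : Int) :
    List (List Int) → Int → Option Int → Int → Int → Option Int
  | T, mass, minm, first, last =>
    if _h : last < m then
      let rem := PySem.List.pyGetD E first (0, 0, 0)
      let add := PySem.List.pyGetD E last (0, 0, 0)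
      let T1 := pvRemoveAt T rem.1 rem.2.1
      let T2 := pvRemoveAt T1 rem.2.1 rem.1
      let T3 := pvAppendAt T2 add.1 add.2.1
      let T4 := pvAppendAt T3 add.2.1 add.1
      let mass' := mass - rem.2.2 + add.2.2
      let minm' := if BFSa T4 0 then
          (match minm with
           | none => some mass'
           | some v => if mass' < v then some mass' else some v)
        else minm
      pvALoop E m T4 mass' minm' (first + 1) (last + 1)
    else minm
termination_by T mass minm first last => (m - last).toNat
decreasing_by omega

def beautree (G : List (List (Int × Int))) : Option Int :=
  let n : Int := (G.length : Int)
  let E := list_to_edge G n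
  let m : Int := (E.length : Int)
  let Es := PySem.List.sorted E (fun e => e.2.2) false
  let T0 := PySem.List.slice Es none (some (n - 1))       -- T = E[:n-1]
  let mass := T0.foldl (fun a e => a + e.2.2) 0
  let T := edge_to_list T0 n
  let minm := if BFSa T 0 then some mass else none        -- float('inf') modelled as none
  pvALoop Es m T mass minm 0 (n - 1)

-- ===== PORT B =====
def pvConnStep (r : List Bool) (e : Int × Int × Int) : List Bool :=
  if PySem.List.pyGetD r e.1 false || PySem.List.pyGetD r e.2.1 false then
    PySem.List.pySetD (PySem.List.pySetD r e.1 true) e.2.1 true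
  else r

-- _connected of Source B: n sweeps over the window's edge list, marking endpoints
def connectedB (E : List (Int × Int × Int)) (n : Int) : Bool :=
  let reach := List.replicate n.toNat false
  let reach := if 0 < n then PySem.List.pySetD reach 0 true else reach
  let reach := (List.range n.toNat).foldl (fun r _ => E.foldl pvConnStep r) reach
  reach.all (fun b => b)

def beautree_alt (G : List (List (Int × Int))) : Option Int :=
  let n : Int := (G.length : Int)
  let E := PySem.List.sorted
    ((PySem.List.pyRange 0 n 1).flatMap (fun s =>
      ((PySem.List.pyGetD G s []).filter (fun q => decide (s < q.1))).map
        (fun q => (s, q.1, q.2))))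
    (fun e => e.2.2) false
  let m : Int := (E.length : Int)
  (List.range (1 + max 0 (m - n + 1)).toNat).foldl (fun best (k : Nat) =>
    let window := PySem.List.slice E (some (k : Int)) (some ((k : Int) + n - 1))
    if connectedB window n then
      let mass := (window.map (fun e => e.2.2)).sum
      match best with
      | none => some mass
      | some b => if mass < b then some mass else some b
    else best) none

-- ===== PRECONDITION & SPEC =====
-- Pre_ excludes exactly the inputs on which A raises IndexError: the empty graph (visited[0] on an
-- empty visited list) and graphs naming a forward neighbour index ≥ len(G) (edge_to_list indexes it).
def Pre_beautree (G : List (List (Int × Int))) : Prop :=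
  G ≠ [] ∧ ∀ i : Nat, i < G.length → ∀ p ∈ G.getD i [], ((i : Int) < p.1 → p.1 < (G.length : Int))
instance (G : List (List (Int × Int))) : Decidable (Pre_beautree G) := by
  unfold Pre_beautree; infer_instance
def pvWitness_beautree : (List (List (Int × Int))) := [[(1, 5)], []]

def Spec_beautree (G : List (List (Int × Int))) (out : Option Int) : Prop := out = beautree_alt G
instance (G : List (List (Int × Int))) (out : Option Int) : Decidable (Spec_beautree G out) := by
  unfold Spec_beautree; infer_instance

-- ===== CLAIM (what is proved, stated in full; the proofs are below) =====
def Claim_equal_beautree : Prop := ∀ (G : List (List (Int × Int))), Dom_beautree G → Pre_beautree G → Spec_beautree G (beautree G)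

-- ===== LEMMAS AND PROOFS =====

-- specification vocabulary shared by the two connectivity proofs
def pvValidE (n : Nat) (W : List (Int × Int × Int)) : Prop :=
  ∀ e ∈ W, 0 ≤ e.1 ∧ e.1 < e.2.1 ∧ e.2.1 < (n : Int)

def pvEdgeIn (W : List (Int × Int × Int)) (u v : Int) : Prop :=
  (∃ w, (u, v, w) ∈ W) ∨ (∃ w, (v, u, w) ∈ W)

def pvReach (W : List (Int × Int × Int)) (v : Int) : Prop :=
  Relation.ReflTransGen (pvEdgeIn W) 0 v

def pvConn (W : List (Int × Int × Int)) (n : Nat) : Prop :=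
  ∀ j : Nat, j < n → pvReach W (j : Int)

-- invariant tying A's mutated adjacency lists to the current window (multiset view per vertex)
def pvTInv (T : List (List Int)) (W : List (Int × Int × Int)) (n : Nat) : Prop :=
  T.length = n ∧ ∀ a : Nat, a < n → ∀ b : Int,
    (T.getD a []).count b =
      W.countP (fun e => decide (e.1 = (a : Int) ∧ e.2.1 = b)) +
      W.countP (fun e => decide (e.1 = b ∧ e.2.1 = (a : Int)))

def pvAdjOK (T : List (List Int)) (W : List (Int × Int × Int)) (n : Nat) : Prop :=
  T.length = n ∧ ∀ a : Nat, a < n → ∀ b : Int, (b ∈ T.getD a [] ↔ pvEdgeIn W (a : Int) b)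

-- ---- Bool-list utilities ----
theorem pvGetD_set_true (r : List Bool) (k j : Nat) :
    ((r.set k true).getD j false = true) ↔ ((j = k ∧ k < r.length) ∨ r.getD j false = true) := by
  simp only [List.getD_eq_getElem?_getD, List.getElem?_set]
  by_cases hjk : k = j
  · subst hjk
    by_cases hk : k < r.length <;> simp [hk]
  · have hjk' : ¬ j = k := fun h => hjk h.symm
    simp [hjk, hjk']

theorem pvSetD_true_mono (r : List Bool) (i : Int) (j : Nat)
    (h : r.getD j false = true) : (PySem.List.pySetD r i true).getD j false = true := by
  unfold PySem.List.pySetD PySem.List.pySet?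
  rcases hk : PySem.List.pyIdx? r.length i with _ | k
  · simpa using h
  · simp only [Option.map_some, Option.getD_some]
    exact (pvGetD_set_true r k j).2 (Or.inr h)

theorem pvSetD_true_cases (r : List Bool) (i : Int) (j : Nat)
    (h : (PySem.List.pySetD r i true).getD j false = true) :
    r.getD j false = true ∨ (0 ≤ i ∧ j = i.toNat) ∨ i < 0 := by
  unfold PySem.List.pySetD PySem.List.pySet? at h
  rcases hk : PySem.List.pyIdx? r.length i with _ | k
  · rw [hk] at h; simp at h; exact Or.inl h
  · rw [hk] at h
    simp only [Option.map_some, Option.getD_some] at h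
    rcases (pvGetD_set_true r k j).1 h with ⟨hj, _⟩ | hold
    · unfold PySem.List.pyIdx? at hk
      split_ifs at hk <;> simp_all <;> omega
    · exact Or.inl hold

theorem pvSetD_nonneg_lt_getD_self (r : List Bool) (i : Int) (h0 : 0 ≤ i)
    (hlt : i.toNat < r.length) : (PySem.List.pySetD r i true).getD i.toNat false = true := by
  rw [PySem.List.pySetD_of_nonneg r true h0]
  exact (pvGetD_set_true r i.toNat i.toNat).2 (Or.inl ⟨rfl, hlt⟩)

theorem pvCountTrue_le : ∀ (r r' : List Bool), r.length = r'.length →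
    (∀ j, r.getD j false = true → r'.getD j false = true) → r.count true ≤ r'.count true := by
  intro r
  induction r with
  | nil => intro r' h _; simp
  | cons a t ih =>
    intro r' hlen hle
    cases r' with
    | nil => simp at hlen
    | cons b t' =>
      have hh := hle 0
      have ht := ih t' (by simpa using hlen) (fun j h => by simpa using hle (j + 1) (by simpa using h))
      simp only [List.getD_cons_zero] at hh
      cases a <;> cases b <;> simp_all [List.count_cons] <;> omega

theorem pvCountTrue_lt : ∀ (r r' : List Bool), r.length = r'.length →
    (∀ j, r.getD j false = true → r'.getD j false = true) → r ≠ r' →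
    r.count true < r'.count true := by
  intro r
  induction r with
  | nil => intro r' hlen _ hne; cases r' <;> simp_all
  | cons a t ih =>
    intro r' hlen hle hne
    cases r' with
    | nil => simp at hlen
    | cons b t' =>
      have hh := hle 0
      have hlen' : t.length = t'.length := by simpa using hlen
      have hle' : ∀ j, t.getD j false = true → t'.getD j false = true :=
        fun j h => by simpa using hle (j + 1) (by simpa using h)
      simp only [List.getD_cons_zero] at hh
      by_cases hab : a = b
      · subst hab
        have htne : t ≠ t' := by intro h; exact hne (by rw [h])
        have := ih t' hlen' hle' htne
        cases a <;> simp_all [List.count_cons]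
      · have hcle := pvCountTrue_le t t' hlen' hle'
        cases a <;> cases b
        · exact absurd rfl hab
        · simp only [List.count_cons]
          simp only [List.count_cons] at hcle ⊢
          simp
          omega
        · simp at hh
        · exact absurd rfl hab

theorem pvAllTrue_iff (r : List Bool) :
    (r.all (fun b => b) = true) ↔ ∀ j, j < r.length → r.getD j false = true := by
  rw [List.all_eq_true]
  constructor
  · intro h j hj
    rw [List.getD_eq_getElem r false hj]
    exact h _ (List.getElem_mem hj)
  · intro h b hb
    rcases List.mem_iff_getElem.1 hb with ⟨j, hj, rfl⟩
    have := h j hj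
    rwa [List.getD_eq_getElem r false hj] at this


theorem pvR0_getD (n j : Nat) (hn : 1 ≤ n) :
    ((List.replicate n false).set 0 true).getD j false = true ↔ j = 0 := by
  rw [pvGetD_set_true]
  simp only [List.length_replicate]
  constructor
  · rintro (⟨h, _⟩ | h)
    · exact h
    · exfalso
      rw [List.getD_eq_getElem?_getD] at h
      rcases Nat.lt_or_ge j n with hj | hj
      · rw [List.getElem?_replicate] at h
        simp [hj] at h
      · rw [List.getElem?_eq_none_iff.2 (by simpa using hj)] at h
        simp at h
  · intro h; exact Or.inl ⟨h, by omega⟩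


theorem pvTInv_adjOK {T W n} (hT : pvTInv T W n) : pvAdjOK T W n := by
  refine ⟨hT.1, fun a ha b => ?_⟩
  rw [← List.count_pos_iff, hT.2 a ha b]
  constructor
  · intro hpos
    rcases Nat.lt_or_ge 0 (W.countP (fun e => decide (e.1 = (a : Int) ∧ e.2.1 = b))) with hp | hp
    · rcases List.countP_pos_iff.1 hp with ⟨e, heW, hpe⟩
      simp only [decide_eq_true_eq] at hpe
      exact Or.inl ⟨e.2.2, by rw [← hpe.1, ← hpe.2]; simpa using heW⟩
    · have hp2 : 0 < W.countP (fun e => decide (e.1 = b ∧ e.2.1 = (a : Int))) := by omega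
      rcases List.countP_pos_iff.1 hp2 with ⟨e, heW, hpe⟩
      simp only [decide_eq_true_eq] at hpe
      exact Or.inr ⟨e.2.2, by rw [← hpe.1, ← hpe.2]; simpa using heW⟩
  · rintro (⟨w, hw⟩ | ⟨w, hw⟩)
    · have : 0 < W.countP (fun e => decide (e.1 = (a : Int) ∧ e.2.1 = b)) :=
        List.countP_pos_iff.2 ⟨((a : Int), b, w), hw, by simp⟩
      omega
    · have : 0 < W.countP (fun e => decide (e.1 = b ∧ e.2.1 = (a : Int))) :=
        List.countP_pos_iff.2 ⟨(b, (a : Int), w), hw, by simp⟩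
      omega

-- ---- BFS fold step/loop properties ----
theorem pvBfsStep_props (v : List Bool) (q : List Int) (x : Int) (h0 : 0 ≤ x)
    (hx : x.toNat < v.length) :
    ((pvBfsStep (v, q) x).1.length = v.length) ∧
    (∀ j, v.getD j false = true → (pvBfsStep (v, q) x).1.getD j false = true) ∧
    ((pvBfsStep (v, q) x).1.getD x.toNat false = true) ∧
    (∀ j, (pvBfsStep (v, q) x).1.getD j false = true → v.getD j false = true ∨ (j : Int) = x) ∧
    (∀ y ∈ (pvBfsStep (v, q) x).2, y ∈ q ∨
        (y = x ∧ (pvBfsStep (v, q) x).1.getD y.toNat false = true)) ∧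
    (∀ y ∈ q, y ∈ (pvBfsStep (v, q) x).2) ∧
    (∀ j, (pvBfsStep (v, q) x).1.getD j false = true →
        v.getD j false = true ∨ (j : Int) ∈ (pvBfsStep (v, q) x).2) := by
  have hget : PySem.List.pyGetD v x true = v[x.toNat] := by
    rw [PySem.List.pyGetD_of_nonneg _ _ h0, List.getD_eq_getElem v true hx]
  have hset : PySem.List.pySetD v x true = v.set x.toNat true :=
    PySem.List.pySetD_of_nonneg v true h0
  unfold pvBfsStep
  rcases hval : v[x.toNat] with _ | _
  · -- unvisited: mark and enqueue
    rw [if_pos (by rw [hget, hval])]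
    simp only [hset]
    have hmarkx : (v.set x.toNat true).getD x.toNat false = true :=
      (pvGetD_set_true v x.toNat x.toNat).2 (Or.inl ⟨rfl, hx⟩)
    refine ⟨by simp, ?_, hmarkx, ?_, ?_, ?_, ?_⟩
    · intro j h; exact (pvGetD_set_true v x.toNat j).2 (Or.inr h)
    · intro j h
      rcases (pvGetD_set_true v x.toNat j).1 h with ⟨hj, _⟩ | h
      · right; rw [hj]; exact Int.toNat_of_nonneg h0
      · exact Or.inl h
    · intro y hy
      rcases List.mem_append.1 hy with hy | hy
      · exact Or.inl hy
      · simp only [List.mem_singleton] at hy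
        subst hy
        exact Or.inr ⟨rfl, hmarkx⟩
    · intro y hy; exact List.mem_append.2 (Or.inl hy)
    · intro j h
      rcases (pvGetD_set_true v x.toNat j).1 h with ⟨hj, _⟩ | h
      · right; rw [hj, Int.toNat_of_nonneg h0]; simp
      · exact Or.inl h
  · -- already visited
    rw [if_neg (by rw [hget, hval]; simp)]
    refine ⟨rfl, fun j h => h, ?_, fun j h => Or.inl h, ?_, fun y hy => hy, fun j h => Or.inl h⟩
    · rw [List.getD_eq_getElem v false hx, hval]
    · intro y hy; exact Or.inl hy

theorem pvBfsFold_props (L : List Int) : ∀ (v : List Bool) (q : List Int),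
    (∀ x ∈ L, 0 ≤ x ∧ x.toNat < v.length) →
    ((L.foldl pvBfsStep (v, q)).1.length = v.length) ∧
    (∀ j, v.getD j false = true → (L.foldl pvBfsStep (v, q)).1.getD j false = true) ∧
    (∀ x ∈ L, (L.foldl pvBfsStep (v, q)).1.getD x.toNat false = true) ∧
    (∀ j, (L.foldl pvBfsStep (v, q)).1.getD j false = true →
        v.getD j false = true ∨ (j : Int) ∈ L) ∧
    (∀ y ∈ (L.foldl pvBfsStep (v, q)).2, y ∈ q ∨
        (y ∈ L ∧ (L.foldl pvBfsStep (v, q)).1.getD y.toNat false = true)) ∧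
    (∀ y ∈ q, y ∈ (L.foldl pvBfsStep (v, q)).2) ∧
    (∀ j, (L.foldl pvBfsStep (v, q)).1.getD j false = true →
        v.getD j false = true ∨ (j : Int) ∈ (L.foldl pvBfsStep (v, q)).2) := by
  induction L with
  | nil =>
    intro v q _
    exact ⟨rfl, fun j h => h, by simp, fun j h => Or.inl h, fun y hy => Or.inl hy,
      fun y hy => hy, fun j h => Or.inl h⟩
  | cons x t ih =>
    intro v q hL
    rcases hL x (by simp) with ⟨hx0, hxlt⟩
    obtain ⟨s1, s2, s3, s4, s5, s6, s7⟩ := pvBfsStep_props v q x hx0 hxlt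
    rcases hstep : pvBfsStep (v, q) x with ⟨v', q'⟩
    rw [hstep] at s1 s2 s3 s4 s5 s6 s7
    have hL' : ∀ y ∈ t, 0 ≤ y ∧ y.toNat < v'.length := by
      intro y hy
      rcases hL y (by simp [hy]) with ⟨h1, h2⟩
      exact ⟨h1, by rw [s1]; exact h2⟩
    obtain ⟨f1, f2, f3, f4, f5, f6, f7⟩ := ih v' q' hL'
    have hfold : (x :: t).foldl pvBfsStep (v, q) = t.foldl pvBfsStep (v', q') := by
      rw [List.foldl_cons, hstep]
    rw [hfold]
    refine ⟨by rw [f1, s1], ?_, ?_, ?_, ?_, ?_, ?_⟩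
    · intro j h; exact f2 j (s2 j h)
    · intro y hy
      rcases List.mem_cons.1 hy with rfl | hy
      · exact f2 _ s3
      · exact f3 y hy
    · intro j h
      rcases f4 j h with h' | h'
      · rcases s4 j h' with h'' | h''
        · exact Or.inl h''
        · exact Or.inr (by simp [h''])
      · exact Or.inr (by simp [h'])
    · intro y hy
      rcases f5 y hy with hy' | ⟨hyt, hm⟩
      · rcases s5 y hy' with hq | ⟨rfl, hm⟩
        · exact Or.inl hq
        · exact Or.inr ⟨by simp, f2 _ hm⟩
      · exact Or.inr ⟨by simp [hyt], hm⟩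
    · intro y hy; exact f6 y (s6 y hy)
    · intro j h
      rcases f7 j h with h' | h'
      · rcases s7 j h' with h'' | h''
        · exact Or.inl h''
        · exact Or.inr (f6 _ h'')
      · exact Or.inr h'

-- the queue/visited invariant of A's BFS loop
def pvBfsInv (W : List (Int × Int × Int)) (n : Nat) (T : List (List Int))
    (visited : List Bool) (q : List Int) : Prop :=
  visited.length = n ∧
  visited.getD 0 false = true ∧
  (∀ j, j < n → visited.getD j false = true → pvReach W (j : Int)) ∧
  (∀ x ∈ q, 0 ≤ x ∧ x.toNat < n ∧ visited.getD x.toNat false = true) ∧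
  (∀ j, j < n → visited.getD j false = true → ((j : Int) ∉ q) →
    ∀ b ∈ T.getD j [], visited.getD b.toNat false = true)

theorem pvBfsLoop_spec (W : List (Int × Int × Int)) (n : Nat) (hn : 1 ≤ n)
    (hV : pvValidE n W) (T : List (List Int)) (hA : pvAdjOK T W n) :
    ∀ (visited : List Bool) (q : List Int), pvBfsInv W n T visited q →
      (pvBfsLoop T visited q).length = n ∧
      (∀ j, j < n → ((pvBfsLoop T visited q).getD j false = true ↔ pvReach W (j : Int))) := by
  have hAdjMem : ∀ a : Nat, a < n → ∀ b ∈ T.getD a [], 0 ≤ b ∧ b.toNat < n := by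
    intro a ha b hb
    rcases (hA.2 a ha b).1 hb with ⟨w, hw⟩ | ⟨w, hw⟩
    · rcases hV _ hw with ⟨b1, b2, b3⟩
      simp only at b1 b2 b3
      constructor <;> omega
    · rcases hV _ hw with ⟨b1, b2, b3⟩
      simp only at b1 b2 b3
      constructor <;> omega
  intro visited q
  induction visited, q using pvBfsLoop.induct (T := T) with
  | case1 visited =>
    intro hInv
    obtain ⟨hlen, h0, hsound, _hq, hclosure⟩ := hInv
    rw [pvBfsLoop]
    have key : ∀ v : Int, pvReach W v → 0 ≤ v ∧ v.toNat < n ∧ visited.getD v.toNat false = true := by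
      intro v hv
      induction hv with
      | refl => exact ⟨le_refl 0, by simpa using hn, by simpa using h0⟩
      | @tail u v' _hu hedge ihv =>
        rcases ihv with ⟨hu0, hun, humark⟩
        have hmem : v' ∈ T.getD u.toNat [] := by
          apply (hA.2 u.toNat hun v').2
          rw [Int.toNat_of_nonneg hu0]
          exact hedge
        have hv'b := hAdjMem u.toNat hun v' hmem
        exact ⟨hv'b.1, hv'b.2, hclosure u.toNat hun humark (by simp) v' hmem⟩
    refine ⟨hlen, fun j hj => ⟨fun h => hsound j hj h, fun hreach => ?_⟩⟩
    have := (key (j : Int) hreach).2.2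
    simpa using this
  | case2 visited s qs vq ih =>
    intro hInv
    obtain ⟨hlen, h0, hsound, hq, hclosure⟩ := hInv
    rcases hq s (by simp) with ⟨hs0, hsn, hsvis⟩
    have hTs : PySem.List.pyGetD T s [] = T.getD s.toNat [] :=
      PySem.List.pyGetD_of_nonneg _ _ hs0
    have hL : ∀ x ∈ PySem.List.pyGetD T s [], 0 ≤ x ∧ x.toNat < visited.length := by
      rw [hTs, hlen]
      exact hAdjMem s.toNat hsn
    obtain ⟨f1, f2, f3, f4, f5, f6, f7⟩ :=
      pvBfsFold_props (PySem.List.pyGetD T s []) visited qs hL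
    rw [pvBfsLoop]
    apply ih
    show pvBfsInv W n T ((PySem.List.pyGetD T s []).foldl pvBfsStep (visited, qs)).1
      ((PySem.List.pyGetD T s []).foldl pvBfsStep (visited, qs)).2
    have hReachS : pvReach W s := by
      have := hsound s.toNat hsn hsvis
      rwa [Int.toNat_of_nonneg hs0] at this
    refine ⟨by rw [f1, hlen], f2 0 h0, ?_, ?_, ?_⟩
    · -- soundness
      intro j hj hmark
      rcases f4 j hmark with hold | hin
      · exact hsound j hj hold
      · rw [hTs] at hin
        have hedge : pvEdgeIn W ((s.toNat : Int)) (j : Int) := (hA.2 s.toNat hsn (j : Int)).1 hin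
        rw [Int.toNat_of_nonneg hs0] at hedge
        exact hReachS.tail hedge
    · -- queue members
      intro y hy
      rcases f5 y hy with hy' | ⟨hyL, hym⟩
      · rcases hq y (by simp [hy']) with ⟨h1', h2', h3'⟩
        exact ⟨h1', h2', f2 _ h3'⟩
      · rw [hTs] at hyL
        rcases hAdjMem s.toNat hsn y hyL with ⟨h1', h2'⟩
        exact ⟨h1', h2', hym⟩
    · -- closure
      intro j hj hmark hnotin b hb
      rcases f7 j hmark with hold | hin
      · by_cases hjs : (j : Int) = s
        · have hjeq : j = s.toNat := by omega
          apply f3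
          rw [hTs, ← hjeq]
          exact hb
        · by_cases hjq : (j : Int) ∈ qs
          · exact absurd (f6 _ hjq) hnotin
          · have : (j : Int) ∉ (s :: qs) := by simp [hjs, hjq]
            exact f2 _ (hclosure j hj hold this b hb)
      · exact absurd hin hnotin

theorem pvNotContainsFalse_iff (r : List Bool) :
    (!(r.contains false)) = (r.all (fun b => b)) := by
  induction r with
  | nil => rfl
  | cons a t ih => cases a <;> simp_all [List.contains_cons]

theorem pvBFSa_iff (W : List (Int × Int × Int)) (n : Nat) (hn : 1 ≤ n)
    (hV : pvValidE n W) (T : List (List Int)) (hA : pvAdjOK T W n) :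
    (BFSa T 0 = true ↔ pvConn W n) := by
  have hTlen : T.length = n := hA.1
  unfold BFSa
  dsimp only
  rw [hTlen]
  have hvis0 : PySem.List.pySetD (List.replicate n false) 0 true =
      (List.replicate n false).set 0 true := by
    rw [PySem.List.pySetD_of_nonneg _ _ (le_refl 0)]
    norm_num
  rw [hvis0]
  have hInv : pvBfsInv W n T ((List.replicate n false).set 0 true) [0] := by
    refine ⟨by simp, (pvR0_getD n 0 hn).2 rfl, ?_, ?_, ?_⟩
    · intro j _ h
      rw [pvR0_getD n j hn] at h
      subst h
      exact Relation.ReflTransGen.refl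
    · intro x hx
      simp only [List.mem_singleton] at hx
      subst hx
      exact ⟨le_refl 0, by simpa using hn, (pvR0_getD n 0 hn).2 rfl⟩
    · intro j _ hmark hnot b _
      rw [pvR0_getD n j hn] at hmark
      subst hmark
      simp at hnot
  obtain ⟨hflen, hfiff⟩ := pvBfsLoop_spec W n hn hV T hA _ _ hInv
  rw [pvNotContainsFalse_iff, pvAllTrue_iff, hflen]
  constructor
  · intro h j hj
    exact (hfiff j hj).1 (h j hj)
  · intro h j hj
    exact (hfiff j hj).2 (h j hj)

-- ---- B-side sweep (pvConnStep fold) correctness ----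
def pvSweep (E : List (Int × Int × Int)) (r : List Bool) : List Bool := E.foldl pvConnStep r

theorem pvConnStep_length (r : List Bool) (e : Int × Int × Int) :
    (pvConnStep r e).length = r.length := by
  unfold pvConnStep
  split
  · rw [PySem.List.length_pySetD, PySem.List.length_pySetD]
  · rfl

theorem pvConnStep_mono (r : List Bool) (e : Int × Int × Int) (j : Nat)
    (h : r.getD j false = true) : (pvConnStep r e).getD j false = true := by
  unfold pvConnStep
  split
  · exact pvSetD_true_mono _ _ _ (pvSetD_true_mono _ _ _ h)
  · exact h

theorem pvSweep_length (E : List (Int × Int × Int)) : ∀ r, (pvSweep E r).length = r.length := by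
  induction E with
  | nil => intro r; rfl
  | cons e t ih =>
    intro r
    show (pvSweep t (pvConnStep r e)).length = r.length
    rw [ih, pvConnStep_length]

theorem pvSweep_mono (E : List (Int × Int × Int)) : ∀ r j, r.getD j false = true →
    (pvSweep E r).getD j false = true := by
  induction E with
  | nil => intro r j h; exact h
  | cons e t ih => intro r j h; exact ih _ j (pvConnStep_mono r e j h)

theorem pvSweep_sound (n : Nat) (W E : List (Int × Int × Int)) (hE : ∀ e ∈ E, e ∈ W)
    (hV : pvValidE n W) : ∀ r, r.length = n →
    (∀ j, j < n → r.getD j false = true → pvReach W (j : Int)) →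
    (∀ j, j < n → (pvSweep E r).getD j false = true → pvReach W (j : Int)) := by
  induction E with
  | nil => intro r _ hs; exact hs
  | cons e t ih =>
    intro r hlen hs
    have heW : e ∈ W := hE e (by simp)
    rcases hV e heW with ⟨h1, h2, h3⟩
    refine ih (fun x hx => hE x (by simp [hx])) (pvConnStep r e) ?_ ?_
    · rw [pvConnStep_length, hlen]
    · intro j hj hget
      unfold pvConnStep at hget
      split at hget
      · next hguard =>
        have hor : pvReach W e.1 ∨ pvReach W e.2.1 := by
          rcases Bool.or_eq_true_iff.1 hguard with hg | hg
          · left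
            rw [PySem.List.pyGetD_of_nonneg _ _ h1] at hg
            have := hs e.1.toNat (by omega) hg
            rwa [Int.toNat_of_nonneg h1] at this
          · right
            rw [PySem.List.pyGetD_of_nonneg _ _ (by omega)] at hg
            have := hs e.2.1.toNat (by omega) hg
            rwa [Int.toNat_of_nonneg (by omega)] at this
        have hedge : pvEdgeIn W e.1 e.2.1 := Or.inl ⟨e.2.2, by simpa using heW⟩
        have hr1 : pvReach W e.1 := by
          rcases hor with h | h
          · exact h
          · exact h.tail (Or.inr ⟨e.2.2, by simpa using heW⟩)
        have hr2 : pvReach W e.2.1 := hr1.tail hedge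
        rcases pvSetD_true_cases _ _ _ hget with hrest | ⟨_, hj2⟩ | hneg
        · rcases pvSetD_true_cases _ _ _ hrest with hold | ⟨_, hj1⟩ | hneg
          · exact hs j hj hold
          · subst hj1; rwa [Int.toNat_of_nonneg h1]
          · omega
        · subst hj2; rwa [Int.toNat_of_nonneg (by omega)]
        · omega
      · exact hs j hj hget

theorem pvIterate_foldl (f : List Bool → List Bool) (k : Nat) (r0 : List Bool) :
    (List.range k).foldl (fun r _ => f r) r0 = f^[k] r0 := by
  induction k with
  | zero => rfl
  | succ m ih =>
    rw [List.range_succ, List.foldl_append, ih, Function.iterate_succ_apply']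
    rfl

theorem pvIterate_length (E : List (Int × Int × Int)) (k : Nat) (r0 : List Bool) :
    ((pvSweep E)^[k] r0).length = r0.length := by
  induction k with
  | zero => rfl
  | succ m ih => rw [Function.iterate_succ_apply', pvSweep_length, ih]

theorem pvFix_after (E : List (Int × Int × Int)) (r0 : List Bool) (n : Nat)
    (hlen : r0.length = n) (hc : 1 ≤ r0.count true) :
    pvSweep E ((pvSweep E)^[n] r0) = (pvSweep E)^[n] r0 := by
  have key : ∀ k : Nat, pvSweep E ((pvSweep E)^[k] r0) = (pvSweep E)^[k] r0 ∨
      1 + k ≤ ((pvSweep E)^[k] r0).count true := by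
    intro k
    induction k with
    | zero => right; simpa using hc
    | succ m ih =>
      rcases ih with hfix | hcount
      · left
        rw [Function.iterate_succ_apply', hfix, hfix]
      · by_cases hfix : pvSweep E ((pvSweep E)^[m] r0) = (pvSweep E)^[m] r0
        · left
          rw [Function.iterate_succ_apply', hfix, hfix]
        · right
          have hlt := pvCountTrue_lt ((pvSweep E)^[m] r0) (pvSweep E ((pvSweep E)^[m] r0))
            (by rw [pvSweep_length]) (fun j h => pvSweep_mono E _ j h)
            (fun h => hfix h.symm)
          rw [Function.iterate_succ_apply']
          omega
  rcases key n with hfix | hcount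
  · exact hfix
  · have := List.count_le_length (l := (pvSweep E)^[n] r0) (a := true)
    rw [pvIterate_length, hlen] at this
    omega

theorem pvFix_closed (n : Nat) (E : List (Int × Int × Int)) (hV : pvValidE n E)
    (final : List Bool) (hlen : final.length = n) (hfix : pvSweep E final = final) :
    ∀ e ∈ E, (final.getD e.1.toNat false = true ∨ final.getD e.2.1.toNat false = true) →
      final.getD e.1.toNat false = true ∧ final.getD e.2.1.toNat false = true := by
  intro e he hor
  rcases hV e he with ⟨h1, h2, h3⟩
  rcases List.append_of_mem he with ⟨E1, E2, hsplit⟩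
  have hmid : ∀ j, final.getD j false = true →
      (E1.foldl pvConnStep final).getD j false = true := fun j h => pvSweep_mono E1 final j h
  have hmidlen : (E1.foldl pvConnStep final).length = n := by
    rw [show E1.foldl pvConnStep final = pvSweep E1 final from rfl, pvSweep_length, hlen]
  set r1 := E1.foldl pvConnStep final with hr1
  have hguard : (PySem.List.pyGetD r1 e.1 false || PySem.List.pyGetD r1 e.2.1 false) = true := by
    rcases hor with h | h
    · have hm := hmid _ h
      rw [Bool.or_eq_true_iff]
      left
      rw [PySem.List.pyGetD_of_nonneg _ _ h1]
      exact hm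
    · have hm := hmid _ h
      rw [Bool.or_eq_true_iff]
      right
      rw [PySem.List.pyGetD_of_nonneg _ _ (by omega)]
      exact hm
  have hstep : pvConnStep r1 e =
      PySem.List.pySetD (PySem.List.pySetD r1 e.1 true) e.2.1 true := by
    unfold pvConnStep
    rw [hguard]
    simp
  have hm1 : (pvConnStep r1 e).getD e.1.toNat false = true := by
    rw [hstep]
    apply pvSetD_true_mono
    exact pvSetD_nonneg_lt_getD_self r1 e.1 h1 (by omega)
  have hm2 : (pvConnStep r1 e).getD e.2.1.toNat false = true := by
    rw [hstep]
    apply pvSetD_nonneg_lt_getD_self _ e.2.1 (by omega)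
    rw [PySem.List.length_pySetD]
    omega
  have hfin : ∀ j, (pvConnStep r1 e).getD j false = true → final.getD j false = true := by
    intro j h
    have : (pvSweep E final).getD j false = true := by
      rw [hsplit]
      unfold pvSweep
      rw [List.foldl_append, List.foldl_cons]
      exact pvSweep_mono E2 _ j h
    rwa [hfix] at this
  exact ⟨hfin _ hm1, hfin _ hm2⟩

theorem pvReach_marked (n : Nat) (E : List (Int × Int × Int)) (hV : pvValidE n E)
    (final : List Bool) (hlen : final.length = n) (hfix : pvSweep E final = final)
    (h0 : final.getD 0 false = true) :
    ∀ v, pvReach E v → final.getD v.toNat false = true := by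
  intro v hv
  induction hv with
  | refl => simpa using h0
  | tail _ hedge ih =>
    next u v' _ =>
    rcases hedge with ⟨w, hw⟩ | ⟨w, hw⟩
    · have := pvFix_closed n E hV final hlen hfix (u, v', w) hw (Or.inl ih)
      exact this.2
    · have := pvFix_closed n E hV final hlen hfix (v', u, w) hw (Or.inr ih)
      exact this.1

theorem pvIterate_mono (E : List (Int × Int × Int)) (k : Nat) :
    ∀ (r : List Bool) (j : Nat), r.getD j false = true →
      ((pvSweep E)^[k] r).getD j false = true := by
  induction k with
  | zero => intro r j h; exact h
  | succ m ih =>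
    intro r j h
    rw [Function.iterate_succ_apply']
    exact pvSweep_mono E _ j (ih r j h)

theorem pvIterate_sound (n : Nat) (E : List (Int × Int × Int)) (hV : pvValidE n E)
    (r0 : List Bool) (hlen : r0.length = n)
    (hs : ∀ j, j < n → r0.getD j false = true → pvReach E (j : Int)) :
    ∀ k, ∀ j, j < n → ((pvSweep E)^[k] r0).getD j false = true → pvReach E (j : Int) := by
  intro k
  induction k with
  | zero => exact hs
  | succ m ih =>
    intro j hj h
    rw [Function.iterate_succ_apply'] at h
    exact pvSweep_sound n E E (fun e he => he) hV ((pvSweep E)^[m] r0)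
      (by rw [pvIterate_length, hlen]) ih j hj h

theorem pvConnectedB_iff (n : Nat) (E : List (Int × Int × Int)) (hV : pvValidE n E)
    (hn : 1 ≤ n) : (connectedB E (n : Int) = true ↔ pvConn E n) := by
  have hpos : (0 : Int) < (n : Int) := by exact_mod_cast hn
  unfold connectedB
  dsimp only
  rw [if_pos hpos, PySem.List.pySetD_of_nonneg _ _ (by omega)]
  simp only [Int.toNat_natCast, Int.toNat_zero]
  set r0 : List Bool := (List.replicate n false).set 0 true with hr0
  have hr0len : r0.length = n := by simp [hr0]
  have hc : 1 ≤ r0.count true := by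
    have : r0.getD 0 false = true := (pvR0_getD n 0 hn).2 rfl
    rw [List.getD_eq_getElem?_getD] at this
    rcases hg : r0[0]? with _ | b
    · rw [hg] at this; simp at this
    · rw [hg] at this; simp at this
      subst this
      have : true ∈ r0 := by
        rcases List.getElem?_eq_some_iff.1 hg with ⟨hlt, hb⟩
        exact hb ▸ List.getElem_mem hlt
      simpa [List.count_pos_iff] using this
  rw [show (fun (r : List Bool) (_ : Nat) => E.foldl pvConnStep r) = (fun r _ => pvSweep E r) from rfl,
    pvIterate_foldl (pvSweep E) n r0]
  set final := (pvSweep E)^[n] r0 with hfinal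
  have hflen : final.length = n := by rw [hfinal, pvIterate_length, hr0len]
  have hfix : pvSweep E final = final := pvFix_after E r0 n hr0len hc
  have base : ∀ j, j < n → r0.getD j false = true → pvReach E (j : Int) := by
    intro j _ h
    rw [pvR0_getD n j hn] at h
    subst h
    exact Relation.ReflTransGen.refl
  have hsound : ∀ j, j < n → final.getD j false = true → pvReach E (j : Int) := by
    rw [hfinal]
    exact pvIterate_sound n E hV r0 hr0len base n
  have hmarked0 : final.getD 0 false = true := by
    rw [hfinal]
    exact pvIterate_mono E n r0 0 ((pvR0_getD n 0 hn).2 rfl)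
  rw [pvAllTrue_iff, hflen]
  constructor
  · intro hall j hj
    exact hsound j hj (hall j hj)
  · intro hconn j hj
    have := pvReach_marked n E hV final hflen hfix hmarked0 (j : Int) (hconn j hj)
    simpa using this

-- ---- A's adjacency-list mutations vs the current window ----
theorem pvAppendAt_length (T : List (List Int)) (i b : Int) :
    (pvAppendAt T i b).length = T.length := by
  unfold pvAppendAt
  rw [PySem.List.length_pySetD]

theorem pvAppendAt_getD (T : List (List Int)) (i b : Int) (h0 : 0 ≤ i)
    (hlt : i.toNat < T.length) (a : Nat) :
    (pvAppendAt T i b).getD a [] =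
      if a = i.toNat then T.getD a [] ++ [b] else T.getD a [] := by
  unfold pvAppendAt
  rw [PySem.List.pySetD_of_nonneg _ _ h0, PySem.List.pyGetD_of_nonneg _ _ h0]
  by_cases ha : a = i.toNat
  · subst ha
    rw [if_pos rfl, List.getD_eq_getElem?_getD, List.getElem?_set, if_pos rfl, if_pos hlt]
    rfl
  · rw [if_neg ha, List.getD_eq_getElem?_getD, List.getElem?_set,
      if_neg (fun h => ha h.symm), ← List.getD_eq_getElem?_getD]

theorem pvRemove?_of_mem {l : List Int} {b : Int} (h : b ∈ l) :
    PySem.List.remove? l b = some (l.erase b) := by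
  unfold PySem.List.remove?
  rcases hk : List.idxOf? b l with _ | k
  · rw [← List.isSome_idxOf? (l := l) (a := b)] at h
    rw [hk] at h
    simp at h
  · simp only [Option.map_some, Option.some.injEq]
    rw [List.erase_eq_eraseIdx, hk]

theorem pvRemoveAt_length (T : List (List Int)) (i b : Int) (h0 : 0 ≤ i)
    (hlt : i.toNat < T.length) (hmem : b ∈ T.getD i.toNat []) :
    (pvRemoveAt T i b).length = T.length := by
  unfold pvRemoveAt
  rw [PySem.List.pyGetD_of_nonneg _ _ h0, pvRemove?_of_mem hmem]
  rw [PySem.List.length_pySetD]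

theorem pvRemoveAt_getD (T : List (List Int)) (i b : Int) (h0 : 0 ≤ i)
    (hlt : i.toNat < T.length) (hmem : b ∈ T.getD i.toNat []) (a : Nat) :
    (pvRemoveAt T i b).getD a [] =
      if a = i.toNat then (T.getD a []).erase b else T.getD a [] := by
  unfold pvRemoveAt
  rw [PySem.List.pyGetD_of_nonneg _ _ h0, pvRemove?_of_mem hmem]
  simp only
  rw [PySem.List.pySetD_of_nonneg _ _ h0]
  by_cases ha : a = i.toNat
  · subst ha
    rw [if_pos rfl, List.getD_eq_getElem?_getD, List.getElem?_set, if_pos rfl, if_pos hlt]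
    rfl
  · rw [if_neg ha, List.getD_eq_getElem?_getD, List.getElem?_set,
      if_neg (fun h => ha h.symm), ← List.getD_eq_getElem?_getD]

theorem pvCntIf_pos {P : Prop} [Decidable P] (h : P) :
    (if (decide P) = true then 1 else 0) = 1 := by simp [h]

theorem pvCntIf_neg {P : Prop} [Decidable P] (h : ¬P) :
    (if (decide P) = true then 1 else 0) = 0 := by simp [h]

theorem pvTInv_append_edge {T : List (List Int)} {W : List (Int × Int × Int)} {n : Nat}
    (hT : pvTInv T W n) (e : Int × Int × Int)
    (he : 0 ≤ e.1 ∧ e.1 < e.2.1 ∧ e.2.1 < (n : Int)) :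
    pvTInv (pvAppendAt (pvAppendAt T e.1 e.2.1) e.2.1 e.1) (W ++ [e]) n := by
  obtain ⟨hlen, hcnt⟩ := hT
  obtain ⟨h1, h2, h3⟩ := he
  have hne : e.1.toNat ≠ e.2.1.toNat := by omega
  have hlen1 : (pvAppendAt T e.1 e.2.1).length = n := by rw [pvAppendAt_length, hlen]
  constructor
  · rw [pvAppendAt_length, hlen1]
  · intro a ha b
    rw [pvAppendAt_getD _ _ _ (by omega) (by omega) a,
      pvAppendAt_getD _ _ _ h1 (by omega) a]
    simp only [List.countP_append, List.countP_cons, List.countP_nil, Nat.zero_add]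
    by_cases ha2 : a = e.2.1.toNat
    · have haI : (a : Int) = e.2.1 := by omega
      rw [if_pos ha2, if_neg (show ¬ a = e.1.toNat by omega)]
      rw [List.count_append, hcnt _ ha b]
      have hc : List.count b [e.1] = if e.1 = b then 1 else 0 := by
        simp [List.count_cons]
      rw [hc, pvCntIf_neg (fun hp => by omega : ¬ (e.1 = (a : Int) ∧ e.2.1 = b))]
      by_cases hb : e.1 = b
      · rw [pvCntIf_pos (show e.1 = b ∧ e.2.1 = (a : Int) from ⟨hb, haI.symm⟩), if_pos hb]
        omega
      · rw [pvCntIf_neg (fun hp => hb hp.1), if_neg hb]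
        omega
    · rw [if_neg ha2]
      by_cases ha1 : a = e.1.toNat
      · have haI : (a : Int) = e.1 := by omega
        rw [if_pos ha1, List.count_append, hcnt _ ha b]
        have hc : List.count b [e.2.1] = if e.2.1 = b then 1 else 0 := by
          simp [List.count_cons]
        rw [hc, pvCntIf_neg (fun hp => by omega : ¬ (e.1 = b ∧ e.2.1 = (a : Int)))]
        by_cases hb : e.2.1 = b
        · rw [pvCntIf_pos (show e.1 = (a : Int) ∧ e.2.1 = b from ⟨haI.symm, hb⟩), if_pos hb]
          omega
        · rw [pvCntIf_neg (fun hp => hb hp.2), if_neg hb]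
          omega
      · rw [if_neg ha1, hcnt _ ha b]
        rw [pvCntIf_neg (fun hp => by omega : ¬ (e.1 = (a : Int) ∧ e.2.1 = b)),
          pvCntIf_neg (fun hp => by omega : ¬ (e.1 = b ∧ e.2.1 = (a : Int)))]
        omega

theorem pvTInv_remove_edge {T : List (List Int)} {W : List (Int × Int × Int)} {n : Nat}
    (e : Int × Int × Int) (hT : pvTInv T (e :: W) n)
    (he : 0 ≤ e.1 ∧ e.1 < e.2.1 ∧ e.2.1 < (n : Int)) :
    pvTInv (pvRemoveAt (pvRemoveAt T e.1 e.2.1) e.2.1 e.1) W n := by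
  obtain ⟨hlen, hcnt⟩ := hT
  obtain ⟨h1, h2, h3⟩ := he
  have h1n : e.1.toNat < n := by omega
  have h2n : e.2.1.toNat < n := by omega
  have hne : e.1.toNat ≠ e.2.1.toNat := by omega
  have hcast1 : ((e.1.toNat : Nat) : Int) = e.1 := Int.toNat_of_nonneg h1
  have hcast2 : ((e.2.1.toNat : Nat) : Int) = e.2.1 := Int.toNat_of_nonneg (by omega)
  have hmem1 : e.2.1 ∈ T.getD e.1.toNat [] := by
    rw [← List.count_pos_iff, hcnt _ h1n e.2.1]
    simp only [List.countP_cons]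
    have hd : (if (decide (e.1 = ((e.1.toNat : Nat) : Int) ∧ True)) = true then 1 else 0) = 1 := by
      simp [hcast1]
    rw [hd]
    omega
  have hR1len : (pvRemoveAt T e.1 e.2.1).length = n := by
    rw [pvRemoveAt_length _ _ _ h1 (by omega) hmem1, hlen]
  have hR1getD := pvRemoveAt_getD T e.1 e.2.1 h1 (by omega) hmem1
  have hmem2 : e.1 ∈ (pvRemoveAt T e.1 e.2.1).getD e.2.1.toNat [] := by
    rw [hR1getD, if_neg (show ¬ e.2.1.toNat = e.1.toNat by omega), ← List.count_pos_iff,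
      hcnt _ h2n e.1]
    simp only [List.countP_cons]
    have hd : (if (decide (True ∧ e.2.1 = ((e.2.1.toNat : Nat) : Int))) = true then 1 else 0) = 1 := by
      simp [hcast2]
    rw [hd]
    omega
  constructor
  · rw [pvRemoveAt_length _ _ _ (by omega) (by omega) hmem2, hR1len]
  · intro a ha b
    rw [pvRemoveAt_getD _ _ _ (by omega) (by omega) hmem2 a, hR1getD a]
    have hWcnt := hcnt a ha b
    simp only [List.countP_cons] at hWcnt
    by_cases ha2 : a = e.2.1.toNat
    · have haI : (a : Int) = e.2.1 := by omega
      rw [if_pos ha2, if_neg (show ¬ a = e.1.toNat by omega)]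
      rw [pvCntIf_neg (fun hp => by omega : ¬ (e.1 = (a : Int) ∧ e.2.1 = b))] at hWcnt
      by_cases hb : b = e.1
      · subst hb
        rw [List.count_erase_self]
        rw [pvCntIf_pos (show e.1 = e.1 ∧ e.2.1 = (a : Int) from ⟨rfl, haI.symm⟩)] at hWcnt
        omega
      · rw [List.count_erase_of_ne hb]
        rw [pvCntIf_neg (fun hp => hb hp.1.symm)] at hWcnt
        omega
    · rw [if_neg ha2]
      by_cases ha1 : a = e.1.toNat
      · have haI : (a : Int) = e.1 := by omega
        rw [if_pos ha1]
        rw [pvCntIf_neg (fun hp => by omega : ¬ (e.1 = b ∧ e.2.1 = (a : Int)))] at hWcnt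
        by_cases hb : b = e.2.1
        · subst hb
          rw [List.count_erase_self]
          rw [pvCntIf_pos (show e.1 = (a : Int) ∧ e.2.1 = e.2.1 from ⟨haI.symm, rfl⟩)] at hWcnt
          omega
        · rw [List.count_erase_of_ne hb]
          rw [pvCntIf_neg (fun hp => hb hp.2.symm)] at hWcnt
          omega
      · rw [if_neg ha1]
        rw [pvCntIf_neg (fun hp => by omega : ¬ (e.1 = (a : Int) ∧ e.2.1 = b)),
          pvCntIf_neg (fun hp => by omega : ¬ (e.1 = b ∧ e.2.1 = (a : Int)))] at hWcnt
        omega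

theorem pvTInv_foldl (n : Nat) : ∀ (W2 : List (Int × Int × Int)) (T : List (List Int)) (W1),
    pvTInv T W1 n → pvValidE n W2 →
    pvTInv (W2.foldl (fun T e => pvAppendAt (pvAppendAt T e.1 e.2.1) e.2.1 e.1) T) (W1 ++ W2) n := by
  intro W2
  induction W2 with
  | nil =>
    intro T W1 h _
    simpa using h
  | cons e t ih =>
    intro T W1 hT hV
    have step := pvTInv_append_edge hT e (hV e (by simp))
    have hV' : pvValidE n t := fun x hx => hV x (by simp [hx])
    have := ih _ (W1 ++ [e]) step hV'
    simpa using this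

theorem pvTInv_empty (n : Nat) : pvTInv (List.replicate n []) [] n := by
  refine ⟨by simp, fun a ha b => ?_⟩
  rw [List.getD_eq_getElem?_getD, List.getElem?_replicate, if_pos ha]
  simp

theorem pvTInv_init (n : Nat) (W : List (Int × Int × Int)) (hV : pvValidE n W) :
    pvTInv (edge_to_list W (n : Int)) W n := by
  unfold edge_to_list
  have := pvTInv_foldl n W (List.replicate ((n : Int)).toNat []) [] (by simpa using pvTInv_empty n) hV
  simpa using this

-- ---- the sorted edge list and its windows ----
def pvEdgesOf (G : List (List (Int × Int))) : List (Int × Int × Int) :=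
  (PySem.List.pyRange 0 (G.length : Int) 1).flatMap (fun s =>
    ((PySem.List.pyGetD G s []).filter (fun q => decide (s < q.1))).map (fun q => (s, q.1, q.2)))

def pvEs (G : List (List (Int × Int))) : List (Int × Int × Int) :=
  PySem.List.sorted (pvEdgesOf G) (fun e => e.2.2) false

theorem pvList_to_edge_eq (G : List (List (Int × Int))) :
    list_to_edge G (G.length : Int) = pvEdgesOf G := by
  unfold list_to_edge pvEdgesOf
  have hfn : (fun (E : List (Int × Int × Int)) (s : Int) =>
      (PySem.List.pyGetD G s []).foldl
        (fun E (p : Int × Int) => if s < p.1 then E ++ [(s, p.1, p.2)] else E) E)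
      = fun E s => E ++ ((PySem.List.pyGetD G s []).filter (fun (q : Int × Int) => decide (s < q.1))).map
          (fun (q : Int × Int) => (s, q.1, q.2)) := by
    funext E s
    exact PySem.List.foldl_append_ite (fun (p : Int × Int) => s < p.1) (fun (p : Int × Int) => (s, p.1, p.2)) _ _
  rw [hfn, PySem.List.foldl_append_eq_flatMap]
  simp

theorem pvValid_edgesOf (G : List (List (Int × Int))) (hP : Pre_beautree G) :
    pvValidE G.length (pvEdgesOf G) := by
  intro e he
  unfold pvEdgesOf at he
  rcases List.mem_flatMap.1 he with ⟨s, hs, he⟩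
  rcases PySem.List.mem_pyRange_one.1 hs with ⟨hs0, hsn⟩
  rcases List.mem_map.1 he with ⟨q, hq, rfl⟩
  rcases List.mem_filter.1 hq with ⟨hqmem, hqlt⟩
  simp only [decide_eq_true_eq] at hqlt
  have hsN : s.toNat < G.length := by omega
  have hmem : q ∈ G.getD s.toNat [] := by
    rwa [PySem.List.pyGetD_of_nonneg _ _ hs0] at hqmem
  have := hP.2 s.toNat hsN q hmem (by rwa [Int.toNat_of_nonneg hs0])
  refine ⟨hs0, hqlt, this⟩

theorem pvValid_Es (G : List (List (Int × Int))) (hP : Pre_beautree G) :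
    pvValidE G.length (pvEs G) := by
  intro e he
  exact pvValid_edgesOf G hP e ((PySem.List.sorted_perm _ _ _).mem_iff.1 he)

def pvWin (Es : List (Int × Int × Int)) (n k : Nat) : List (Int × Int × Int) :=
  (Es.drop k).take (n - 1)

theorem pvWin_valid {Es : List (Int × Int × Int)} {n : Nat} (hV : pvValidE n Es) (k m : Nat) :
    pvValidE n (pvWin Es m k) := by
  intro e he
  exact hV e (List.drop_subset _ _ (List.take_subset _ _ he))

theorem pvWin_cons (Es : List (Int × Int × Int)) (n k : Nat) (hk : k < Es.length)
    (hn : 2 ≤ n) : pvWin Es n k = Es[k] :: (Es.drop (k + 1)).take (n - 2) := by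
  obtain ⟨m, rfl⟩ : ∃ m, n = m + 2 := ⟨n - 2, by omega⟩
  unfold pvWin
  rw [List.drop_eq_getElem_cons hk]
  rfl

theorem pvWin_snoc (Es : List (Int × Int × Int)) (n k : Nat) (hk : k + (n - 1) < Es.length)
    (hn : 2 ≤ n) :
    pvWin Es n (k + 1) = (Es.drop (k + 1)).take (n - 2) ++ [Es[k + (n - 1)]] := by
  obtain ⟨m, rfl⟩ : ∃ m, n = m + 2 := ⟨n - 2, by omega⟩
  unfold pvWin
  show (Es.drop (k + 1)).take (m + 1) = (Es.drop (k + 1)).take m ++ [Es[k + (m + 2 - 1)]]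
  rw [List.take_add_one]
  congr 1
  rw [List.getElem?_drop]
  have hidx : k + 1 + m = k + (m + 2 - 1) := by omega
  rw [hidx, List.getElem?_eq_getElem hk]
  rfl

theorem pvSlice_win (Es : List (Int × Int × Int)) (n k : Nat) (hn : 1 ≤ n) :
    PySem.List.slice Es (some (k : Int)) (some ((k : Int) + (n : Int) - 1)) = pvWin Es n k := by
  have hcast : (k : Int) + (n : Int) - 1 = ((k + (n - 1) : Nat) : Int) := by push_cast; omega
  rw [hcast, PySem.List.slice_natCast]
  unfold pvWin
  congr 1
  omega

theorem pvSlice0_win (Es : List (Int × Int × Int)) (n : Nat) (hn : 1 ≤ n) :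
    PySem.List.slice Es none (some ((n : Int) - 1)) = pvWin Es n 0 := by
  have hcast : (n : Int) - 1 = ((n - 1 : Nat) : Int) := by push_cast; omega
  rw [hcast, PySem.List.slice_to_natCast]
  unfold pvWin
  rw [List.drop_zero]

-- the loop body of B's fold
def pvBStep (Es : List (Int × Int × Int)) (nI : Int) (best : Option Int) (k : Nat) : Option Int :=
  let window := PySem.List.slice Es (some (k : Int)) (some ((k : Int) + nI - 1))
  if connectedB window nI then
    let mass := (window.map (fun e => e.2.2)).sum
    match best with
    | none => some mass
    | some b => if mass < b then some mass else some b
  else best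

theorem pvAlt_eq (G : List (List (Int × Int))) :
    beautree_alt G =
      (List.range (1 + max 0 (((pvEs G).length : Int) - (G.length : Int) + 1)).toNat).foldl
        (pvBStep (pvEs G) (G.length : Int)) none := by
  unfold beautree_alt pvBStep pvEs pvEdgesOf
  rfl

theorem pvBoth_conn (n : Nat) (hn : 1 ≤ n) (W : List (Int × Int × Int))
    (hV : pvValidE n W) (T : List (List Int)) (hT : pvTInv T W n) :
    BFSa T 0 = connectedB W (n : Int) := by
  rw [Bool.eq_iff_iff, pvBFSa_iff W n hn hV T (pvTInv_adjOK hT), pvConnectedB_iff n W hV hn]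

theorem pvLoop_eq (Es : List (Int × Int × Int)) (n : Nat) (hn : 1 ≤ n)
    (hV : pvValidE n Es) :
    ∀ (d k : Nat) (T : List (List Int)) (mass : Int) (minm : Option Int),
    (((Es.length : Int) - (n : Int) + 1).toNat - k = d) →
    pvTInv T (pvWin Es n k) n →
    mass = ((pvWin Es n k).map (fun e => e.2.2)).sum →
    pvALoop Es (Es.length : Int) T mass minm (k : Int) ((k : Int) + (n : Int) - 1) =
      ((List.range (1 + max 0 ((Es.length : Int) - (n : Int) + 1)).toNat).drop (k + 1)).foldl
        (pvBStep Es (n : Int)) minm := by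
  intro d
  induction d with
  | zero =>
    intro k T mass minm hd _ _
    rw [pvALoop, dif_neg (show ¬ ((k : Int) + (n : Int) - 1 < (Es.length : Int)) by omega)]
    rw [List.drop_eq_nil_of_le (by rw [List.length_range]; omega)]
    rfl
  | succ d ih =>
    intro k T mass minm hd hTI hmass
    have hcond : (k : Int) + (n : Int) - 1 < (Es.length : Int) := by omega
    have hkwm : k + (n - 1) < Es.length := by omega
    have hkm : k < Es.length := by omega
    have hn2 : 2 ≤ n := by
      rcases hV Es[k] (List.getElem_mem hkm) with ⟨a1, a2, a3⟩
      omega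
    have hrem : PySem.List.pyGetD Es (k : Int) (0, 0, 0) = Es[k] := by
      rw [PySem.List.pyGetD_natCast, List.getD_eq_getElem _ _ hkm]
    have haddc : (k : Int) + (n : Int) - 1 = ((k + (n - 1) : Nat) : Int) := by push_cast; omega
    have hadd : PySem.List.pyGetD Es ((k : Int) + (n : Int) - 1) (0, 0, 0) = Es[k + (n - 1)] := by
      rw [haddc, PySem.List.pyGetD_natCast, List.getD_eq_getElem _ _ hkwm]
    rw [pvALoop]
    rw [dif_pos hcond]
    simp only [hrem, hadd]
    -- the new adjacency state satisfies the invariant for the shifted window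
    have hTI' : pvTInv
        (pvAppendAt (pvAppendAt
          (pvRemoveAt (pvRemoveAt T Es[k].1 Es[k].2.1) Es[k].2.1 Es[k].1)
          Es[k + (n - 1)].1 Es[k + (n - 1)].2.1) Es[k + (n - 1)].2.1 Es[k + (n - 1)].1)
        (pvWin Es n (k + 1)) n := by
      rw [pvWin_snoc Es n k hkwm hn2]
      apply pvTInv_append_edge
      · apply pvTInv_remove_edge Es[k]
        · rw [← pvWin_cons Es n k hkm hn2]
          exact hTI
        · exact hV Es[k] (List.getElem_mem hkm)
      · exact hV Es[k + (n - 1)] (List.getElem_mem hkwm)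
    have hmass' : mass - Es[k].2.2 + Es[k + (n - 1)].2.2 =
        ((pvWin Es n (k + 1)).map (fun e => e.2.2)).sum := by
      rw [pvWin_snoc Es n k hkwm hn2, List.map_append, List.sum_append]
      rw [hmass, pvWin_cons Es n k hkm hn2]
      simp only [List.map_cons, List.sum_cons, List.map_nil, List.sum_nil]
      ring
    have hbfs : BFSa (pvAppendAt (pvAppendAt
          (pvRemoveAt (pvRemoveAt T Es[k].1 Es[k].2.1) Es[k].2.1 Es[k].1)
          Es[k + (n - 1)].1 Es[k + (n - 1)].2.1) Es[k + (n - 1)].2.1 Es[k + (n - 1)].1) 0 =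
        connectedB (pvWin Es n (k + 1)) (n : Int) :=
      pvBoth_conn n hn _ (pvWin_valid hV (k + 1) n) _ hTI'
    have hstep : (if BFSa (pvAppendAt (pvAppendAt
          (pvRemoveAt (pvRemoveAt T Es[k].1 Es[k].2.1) Es[k].2.1 Es[k].1)
          Es[k + (n - 1)].1 Es[k + (n - 1)].2.1) Es[k + (n - 1)].2.1 Es[k + (n - 1)].1) 0 = true
        then (match minm with
              | none => some (mass - Es[k].2.2 + Es[k + (n - 1)].2.2)
              | some v => if mass - Es[k].2.2 + Es[k + (n - 1)].2.2 < v
                  then some (mass - Es[k].2.2 + Es[k + (n - 1)].2.2) else some v)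
        else minm) = pvBStep Es (n : Int) minm (k + 1) := by
      unfold pvBStep
      rw [show ((k + 1 : Nat) : Int) + (n : Int) - 1 = (((k + 1) : Nat) : Int) + (n : Int) - 1 from rfl]
      rw [pvSlice_win Es n (k + 1) hn]
      rw [hbfs, hmass']
    rw [hstep]
    have hrec := ih (k + 1)
      (pvAppendAt (pvAppendAt
        (pvRemoveAt (pvRemoveAt T Es[k].1 Es[k].2.1) Es[k].2.1 Es[k].1)
        Es[k + (n - 1)].1 Es[k + (n - 1)].2.1) Es[k + (n - 1)].2.1 Es[k + (n - 1)].1)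
      (mass - Es[k].2.2 + Es[k + (n - 1)].2.2) (pvBStep Es (n : Int) minm (k + 1))
      (by omega) hTI' hmass'
    rw [show (k : Int) + 1 = ((k + 1 : Nat) : Int) from by push_cast; ring,
      show (k : Int) + (n : Int) - 1 + 1 = ((k + 1 : Nat) : Int) + (n : Int) - 1 from by
        push_cast; ring]
    rw [hrec]
    have hdrop : (List.range (1 + max 0 ((Es.length : Int) - (n : Int) + 1)).toNat).drop (k + 1) =
        (k + 1) :: (List.range (1 + max 0 ((Es.length : Int) - (n : Int) + 1)).toNat).drop (k + 2) := by
      rw [List.drop_eq_getElem_cons (by rw [List.length_range]; omega)]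
      rw [List.getElem_range]
    rw [hdrop, List.foldl_cons]

-- ===== VERDICT (by name: the statement is the Claim_ definition above) =====
theorem beautree_spec : Claim_equal_beautree := by
  intro G _hDom hPre
  unfold Spec_beautree
  have hn : 1 ≤ G.length := by
    cases G with
    | nil => exact absurd rfl hPre.1
    | cons a t => simp
  have hV : pvValidE G.length (pvEs G) := pvValid_Es G hPre
  unfold beautree
  dsimp only
  rw [pvList_to_edge_eq]
  rw [show PySem.List.sorted (pvEdgesOf G) (fun e => e.2.2) false = pvEs G from rfl]
  rw [show ((pvEdgesOf G).length : Int) = ((pvEs G).length : Int) from by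
    unfold pvEs; rw [PySem.List.length_sorted]]
  rw [pvSlice0_win (pvEs G) G.length hn]
  rw [PySem.List.foldl_add]
  rw [show (0 : Int) + (((pvWin (pvEs G) G.length 0).map (fun e => e.2.2)).sum) =
    ((pvWin (pvEs G) G.length 0).map (fun e => e.2.2)).sum from by ring]
  have hTI0 : pvTInv (edge_to_list (pvWin (pvEs G) G.length 0) (G.length : Int))
      (pvWin (pvEs G) G.length 0) G.length :=
    pvTInv_init G.length _ (pvWin_valid hV 0 G.length)
  have hB0 : BFSa (edge_to_list (pvWin (pvEs G) G.length 0) (G.length : Int)) 0 =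
      connectedB (pvWin (pvEs G) G.length 0) (G.length : Int) :=
    pvBoth_conn G.length hn _ (pvWin_valid hV 0 G.length) _ hTI0
  have hminm0 : (if BFSa (edge_to_list (pvWin (pvEs G) G.length 0) (G.length : Int)) 0 = true
      then some (((pvWin (pvEs G) G.length 0).map (fun e => e.2.2)).sum) else none)
      = pvBStep (pvEs G) (G.length : Int) none 0 := by
    unfold pvBStep
    rw [pvSlice_win (pvEs G) G.length 0 hn, hB0]
  rw [hminm0]
  rw [show ((G.length : Int) - 1) = (((0 : Nat) : Int) + (G.length : Int) - 1) from by simp,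
    show (0 : Int) = ((0 : Nat) : Int) from rfl]
  rw [pvLoop_eq (pvEs G) G.length hn hV ((((pvEs G).length : Int) - (G.length : Int) + 1).toNat)
    0 _ _ _ (by omega) hTI0 rfl]
  rw [pvAlt_eq]
  have hmax := le_max_left (0 : Int) (((pvEs G).length : Int) - (G.length : Int) + 1)
  have hKpos : 0 < (1 + max 0 (((pvEs G).length : Int) - (G.length : Int) + 1)).toNat := by
    omega
  rw [show (List.range (1 + max 0 (((pvEs G).length : Int) - (G.length : Int) + 1)).toNat) =
      0 :: (List.range (1 + max 0 (((pvEs G).length : Int) - (G.length : Int) + 1)).toNat).drop 1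
    from by
      have h0 := List.drop_eq_getElem_cons
        (l := List.range (1 + max 0 (((pvEs G).length : Int) - (G.length : Int) + 1)).toNat)
        (i := 0) (by rw [List.length_range]; omega)
      rw [List.drop_zero, List.getElem_range] at h0
      exact h0]
  rw [List.foldl_cons]
  simp
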